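-- pv_equiv track=rewrite | github.com/wooseok-AI/CodingTestStudy | BOJ/23291_어항정리.py | rotate_twice
-- ===== SOURCE A (Python) =====
-- def rotate_array(array: list):
--     n_row = len(array)
--     n_col = len(array[0])
--     new_array = [[0] * n_row for _ in range(n_col)]
--
--     for j in range(n_col):
--         for i in range(n_row):
--             new_array[j][n_row-1-i] = array[i][j]
--
--     return new_array
--
-- def rotate_twice(bowl):
--     result = []
--     # 1번 회전
--     bowl1, bowl2 = bowl[:len(bowl)//2], bowl[len(bowl)//2:]
--     result.append(bowl1[::-1])
--     result.append(bowl2)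
--     # 2번 회전
--     top = []
--     bottom = []
--     for i in range(2):
--         top.append(result[i][:len(result[0])//2])
--         bottom.append(result[i][len(result[0])//2:])
--
--     top_rotate = rotate_array(rotate_array(top))
--
--     return top_rotate + bottom
-- ===== SOURCE B (Python) =====
-- def rotate_twice(bowl):
--     h = len(bowl) // 2
--     q = h // 2
--     if q == 0:
--         raise ValueError("rotate_twice needs at least 4 bowls to form the 2-row top block")
--     rows = [bowl[:h][::-1], bowl[h:]]
--     top = [r[:q] for r in rows]
--     bottom = [r[q:] for r in rows]
--     # 180-degree rotation of `top` done directly instead of two 90-degree transposes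
--     return [row[::-1] for row in top[::-1]] + bottom
-- ===== Notes on version B (the rewrite author's own statement) =====
-- stated objective: simpler
-- what changed: Replaces the two 90-degree matrix transposes (nested index loops filling a preallocated 2D array, applied twice) by a direct 180-degree rotation: reverse the list of rows and reverse each row; the rotate_array helper disappears.
import Mathlib
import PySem

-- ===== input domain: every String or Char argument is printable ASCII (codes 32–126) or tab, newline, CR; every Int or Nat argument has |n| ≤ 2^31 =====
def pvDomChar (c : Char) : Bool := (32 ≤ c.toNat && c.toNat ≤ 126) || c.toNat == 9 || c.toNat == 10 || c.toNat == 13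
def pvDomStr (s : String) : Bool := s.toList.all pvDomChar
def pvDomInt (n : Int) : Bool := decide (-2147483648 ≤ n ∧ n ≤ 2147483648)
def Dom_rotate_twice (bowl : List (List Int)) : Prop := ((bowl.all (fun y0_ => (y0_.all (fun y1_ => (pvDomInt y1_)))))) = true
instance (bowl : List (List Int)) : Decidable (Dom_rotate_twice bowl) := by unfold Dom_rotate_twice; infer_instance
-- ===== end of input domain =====

-- B replaces A's two 90° transposes (nested index loops over a preallocated 2D array) by a
-- direct 180° rotation (reverse the rows and reverse each row): a simpler, shorter computation.

-- ===== PORT A =====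
-- rotate_array helper: Python preallocates rows of int 0s and overwrites EVERY cell
-- (j < n_col, i < n_row); the placeholder here is [] — it never survives, so the port is exact.
def rotateArrayA (array : List (List (List Int))) : List (List (List Int)) :=
  let n_row := array.length
  let n_col := (array.headD []).length
  let new_array : List (List (List Int)) :=
    (List.range n_col).map (fun _ => List.replicate n_row ([] : List Int))
  (List.range n_col).foldl
    (fun na j =>
      (List.range n_row).foldl
        (fun na i => na.set j ((na.getD j []).set (n_row - 1 - i) ((array.getD i []).getD j [])))
        na)
    new_array

def rotate_twice (bowl : List (List Int)) : List (List (List Int)) :=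
  let bowl1 := bowl.take (bowl.length / 2)
  let bowl2 := bowl.drop (bowl.length / 2)
  let result : List (List (List Int)) := [bowl1.reverse, bowl2]
  let top := (List.range 2).foldl
    (fun t i => t ++ [(result.getD i []).take ((result.getD 0 []).length / 2)]) []
  let bottom := (List.range 2).foldl
    (fun b i => b ++ [(result.getD i []).drop ((result.getD 0 []).length / 2)]) []
  rotateArrayA (rotateArrayA top) ++ bottom

-- ===== PORT B =====
-- where Python B raises ValueError (q == 0, i.e. fewer than 4 bowls; outside Pre_) the port returns []
def rotate_twice_alt (bowl : List (List Int)) : List (List (List Int)) :=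
  let h := bowl.length / 2
  let q := h / 2
  if q = 0 then []
  else
  let rows : List (List (List Int)) := [(bowl.take h).reverse, bowl.drop h]
  let top := rows.map (fun r => r.take q)
  let bottom := rows.map (fun r => r.drop q)
  (top.reverse.map (fun row => row.reverse)) ++ bottom

-- ===== PRECONDITION & SPEC =====
-- On bowls with fewer than 4 rows Python's rotate_array reaches array[0] on an empty
-- intermediate array and raises IndexError; Pre_ excludes exactly those inputs.
def Pre_rotate_twice (bowl : List (List Int)) : Prop := 4 ≤ bowl.length
instance (bowl : List (List Int)) : Decidable (Pre_rotate_twice bowl) := by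
  unfold Pre_rotate_twice; infer_instance

def pvWitness_rotate_twice : List (List Int) := [[1], [2], [3], [4]]


def Spec_rotate_twice (bowl : List (List Int)) (out : List (List (List Int))) : Prop :=
  out = rotate_twice_alt bowl
instance (bowl : List (List Int)) (out : List (List (List Int))) : Decidable (Spec_rotate_twice bowl out) := by
  unfold Spec_rotate_twice; infer_instance

-- ===== CLAIM (what is proved, stated in full; the proofs are below) =====
def Claim_equal_rotate_twice : Prop := ∀ (bowl : List (List Int)),
  Dom_rotate_twice bowl → Pre_rotate_twice bowl → Spec_rotate_twice bowl (rotate_twice bowl)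

-- ===== LEMMAS AND PROOFS =====

-- reading the cell just written
lemma getD_set_self {α : Type} (l : List α) (j : Nat) (x d : α) (h : j < l.length) :
    (l.set j x).getD j d = x := by
  simp [List.getD_eq_getElem?_getD, h]

lemma getD_eq_getElem {α : Type} (l : List α) (j : Nat) (d : α) (h : j < l.length) :
    l.getD j d = l[j] := by
  simp [List.getD_eq_getElem?_getD, List.getElem?_eq_getElem h]

-- a loop that repeatedly reads and rewrites only cell j acts on that cell alone
lemma foldl_set_get {α : Type} (j : Nat) (d : α) (g : α → Nat → α) :
    ∀ (is : List Nat) (na : List α) (x : α), j < na.length →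
    is.foldl (fun na i => na.set j (g (na.getD j d) i)) (na.set j x)
      = na.set j (is.foldl g x) := by
  intro is
  induction is with
  | nil => intro na x h; rfl
  | cons i is ih =>
      intro na x h
      simp only [List.foldl_cons]
      rw [getD_set_self _ _ _ _ h, List.set_set]
      exact ih na (g x i) h

lemma foldl_set_row {α : Type} (j : Nat) (d : α) (g : α → Nat → α) (i0 : Nat) (is : List Nat)
    (na : List α) (h : j < na.length) :
    (i0 :: is).foldl (fun na i => na.set j (g (na.getD j d) i)) na
      = na.set j ((i0 :: is).foldl g (na.getD j d)) := by
  simp only [List.foldl_cons]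
  exact foldl_set_get j d g is na (g (na.getD j d) i0) h

-- filling positions n-1-i, i = 0..n-1, of a row of length ≥ n
lemma revfill {α : Type} :
    ∀ (n : Nat) (v : Nat → α) (row : List α), n ≤ row.length →
    (List.range n).foldl (fun r i => r.set (n - 1 - i) (v i)) row
      = (List.range n).map (fun k => v (n - 1 - k)) ++ row.drop n := by
  intro n
  induction n with
  | zero => intro v row h; simp
  | succ n ih =>
      intro v row h
      conv_lhs => rw [List.range_succ_eq_map]
      simp only [List.foldl_cons, List.foldl_map]
      have h1 : n + 1 - 1 - 0 = n := by omega
      rw [h1]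
      have hfun : (fun (r : List α) (i : Nat) => r.set (n + 1 - 1 - Nat.succ i) (v (Nat.succ i)))
          = fun (r : List α) (i : Nat) => r.set (n - 1 - i) (v (i + 1)) := by
        funext r i; congr 1; omega
      rw [hfun, ih (fun i => v (i + 1)) (row.set n (v 0)) (by simpa using Nat.le_of_succ_le h)]
      have hn : n < row.length := h
      have hdrop : (row.set n (v 0)).drop n = v 0 :: row.drop (n + 1) := by
        rw [List.drop_set, if_neg (lt_irrefl n), Nat.sub_self,
            List.drop_eq_getElem_cons hn, List.set_cons_zero]
      rw [hdrop, List.range_succ, List.map_append]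
      have hmapeq : (List.range n).map (fun k => v (n - 1 - k + 1))
          = (List.range n).map (fun k => v (n + 1 - 1 - k)) := by
        apply List.map_congr_left
        intro k hk
        have : k < n := List.mem_range.mp hk
        congr 1; omega
      rw [hmapeq]
      simp

-- filling cells 0..m-1 of a list (each from its own old value), indices increasing
lemma outfill {β : Type} (d : β) (F : Nat → β → β) :
    ∀ (m : Nat) (na : List β), m ≤ na.length →
    (List.range m).foldl (fun na j => na.set j (F j (na.getD j d))) na
      = (List.range m).map (fun j => F j (na.getD j d)) ++ na.drop m := by
  intro m
  induction m with
  | zero => intro na h; simp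
  | succ m ih =>
      intro na h
      rw [List.range_succ, List.foldl_append, List.map_append]
      simp only [List.foldl_cons, List.foldl_nil, List.map_cons, List.map_nil]
      rw [ih na (Nat.le_of_succ_le h)]
      have hm : m < na.length := h
      have hlenmap : ((List.range m).map (fun j => F j (na.getD j d))).length = m := by simp
      have hget : (((List.range m).map (fun j => F j (na.getD j d))) ++ na.drop m).getD m d
          = na.getD m d := by
        rw [List.getD_append_right _ _ _ _ (by omega)]
        rw [hlenmap, Nat.sub_self, getD_eq_getElem _ _ _ (by simp; omega),
            getD_eq_getElem _ _ _ hm]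
        simp
      rw [hget, List.set_append]
      rw [if_neg (by omega), hlenmap, Nat.sub_self]
      rw [List.drop_eq_getElem_cons hm, List.set_cons_zero]
      simp

-- replacing each inner row-loop by a single set of row j (j always in range, rows nonempty loop)
lemma outer_congr (arr : List (List (List Int))) (n_row : Nat) (hrow : 1 ≤ n_row) :
    ∀ (js : List Nat) (na : List (List (List Int))), (∀ j ∈ js, j < na.length) →
    js.foldl (fun na j => (List.range n_row).foldl
        (fun na i => na.set j ((na.getD j []).set (n_row - 1 - i) ((arr.getD i []).getD j [])))
        na) na
      = js.foldl (fun na j => na.set j ((List.range n_row).foldl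
          (fun r i => r.set (n_row - 1 - i) ((arr.getD i []).getD j [])) (na.getD j []))) na := by
  intro js
  induction js with
  | nil => intro na _; rfl
  | cons j js ih =>
      intro na hjs
      have hj : j < na.length := hjs j (by simp)
      obtain ⟨i0, is, hr⟩ : ∃ i0 is, List.range n_row = i0 :: is := by
        cases hr : List.range n_row with
        | nil =>
            exfalso
            have := List.length_range (n := n_row)
            rw [hr] at this; simp at this; omega
        | cons a b => exact ⟨a, b, rfl⟩
      simp only [List.foldl_cons]
      rw [hr, foldl_set_row j [] (fun r i => r.set (n_row - 1 - i) ((arr.getD i []).getD j [])) i0 is na hj, ← hr]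
      exact ih _ (by intro j' hj'; rw [List.length_set]; exact hjs j' (by simp [hj']))

-- closed form of the ported rotate_array
lemma rotateArrayA_eq (array : List (List (List Int))) :
    rotateArrayA array
      = (List.range (array.headD []).length).map (fun j =>
          (List.range array.length).map (fun k =>
            (array.getD (array.length - 1 - k) []).getD j [])) := by
  cases array with
  | nil => rfl
  | cons a0 rest =>
      set arr := a0 :: rest with harr
      simp only [rotateArrayA]
      set n_row := arr.length with hnrow
      set n_col := (arr.headD []).length with hncol
      have hrowpos : 1 ≤ n_row := by simp [hnrow, harr]
      -- inner loop = one set of row j, provided j is in range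
      have hinner : ∀ (na : List (List (List Int))) (j : Nat), j < na.length →
          (List.range n_row).foldl
            (fun na i => na.set j ((na.getD j []).set (n_row - 1 - i) ((arr.getD i []).getD j [])))
            na
          = na.set j ((List.range n_row).foldl
              (fun r i => r.set (n_row - 1 - i) ((arr.getD i []).getD j [])) (na.getD j [])) := by
        intro na j hj
        cases hr : List.range n_row with
        | nil => exfalso; have := List.length_range (n := n_row); rw [hr] at this; simp at this; omega
        | cons i0 is =>
            rw [← hr]
            rw [hr]
            exact foldl_set_row j [] (fun r i => r.set (n_row - 1 - i) ((arr.getD i []).getD j [])) i0 is na hj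
      have hinit : ((List.range n_col).map
          (fun _ => List.replicate n_row ([] : List Int))).length = n_col := by simp
      have houter := outfill ([] : List (List Int))
        (fun j row => (List.range n_row).foldl
          (fun r i => r.set (n_row - 1 - i) ((arr.getD i []).getD j [])) row)
        n_col ((List.range n_col).map (fun _ => List.replicate n_row ([] : List Int)))
        (le_of_eq hinit.symm)
      calc (List.range n_col).foldl
            (fun na j => (List.range n_row).foldl
              (fun na i => na.set j ((na.getD j []).set (n_row - 1 - i) ((arr.getD i []).getD j [])))
              na)
            ((List.range n_col).map (fun _ => List.replicate n_row ([] : List Int)))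
          = (List.range n_col).foldl
            (fun na j => na.set j ((List.range n_row).foldl
              (fun r i => r.set (n_row - 1 - i) ((arr.getD i []).getD j [])) (na.getD j [])))
            ((List.range n_col).map (fun _ => List.replicate n_row ([] : List Int))) := by
            apply outer_congr arr n_row hrowpos
            intro j hj
            rw [hinit]
            exact List.mem_range.mp hj
        _ = (List.range n_col).map (fun j =>
              (List.range n_row).foldl
                (fun r i => r.set (n_row - 1 - i) ((arr.getD i []).getD j []))
                (((List.range n_col).map (fun _ => List.replicate n_row ([] : List Int))).getD j []))
            ++ ((List.range n_col).map (fun _ => List.replicate n_row ([] : List Int))).drop n_col := houter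
        _ = (List.range n_col).map (fun j =>
              (List.range n_row).map (fun k => (arr.getD (n_row - 1 - k) []).getD j [])) := by
            rw [List.drop_of_length_le (le_of_eq hinit), List.append_nil]
            apply List.map_congr_left
            intro j hj
            rw [PySem.List.getD_map_range _ _ _ _ (List.mem_range.mp hj)]
            rw [revfill n_row (fun i => (arr.getD i []).getD j []) _ (le_of_eq (List.length_replicate).symm)]
            rw [List.drop_of_length_le (le_of_eq (List.length_replicate)), List.append_nil]

-- reversed read-out of a list of known length
lemma map_range_getD_rev {α : Type} (l : List α) (n : Nat) (d : α) (h : l.length = n) :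
    (List.range n).map (fun k => l.getD (n - 1 - k) d) = l.reverse := by
  apply List.ext_getElem
  · simp [h]
  · intro k hk1 hk2
    have hkn : k < n := by simpa using hk1
    simp only [List.getElem_map, List.getElem_range, List.getElem_reverse]
    rw [getD_eq_getElem _ _ _ (by omega)]
    congr 1; omega

-- two ported 90° rotations of a 2×q block = reverse rows, reverse each row
lemma headD_map_range {α : Type} (g : Nat → α) (n : Nat) (hn : 1 ≤ n) (d : α) :
    ((List.range n).map g).headD d = g 0 := by
  obtain ⟨m, rfl⟩ : ∃ m, n = m + 1 := ⟨n - 1, by omega⟩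
  rw [List.range_succ_eq_map]
  simp

lemma rot2 (a b : List (List Int)) (q : Nat) (hq1 : 1 ≤ q) (ha : a.length = q) (hb : b.length = q) :
    rotateArrayA (rotateArrayA [a, b]) = [b.reverse, a.reverse] := by
  have h1 : rotateArrayA [a, b] = (List.range q).map (fun j => [b.getD j [], a.getD j []]) := by
    rw [rotateArrayA_eq]
    simp only [List.headD_cons, List.length_cons, List.length_nil, ha]
    apply List.map_congr_left
    intro j hj
    rfl
  rw [h1, rotateArrayA_eq,
      headD_map_range (fun j => [b.getD j [], a.getD j []]) q hq1 []]
  simp only [List.length_cons, List.length_nil, List.length_map, List.length_range]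
  have hgen : ∀ (j : Nat),
      (List.range q).map (fun k =>
        (((List.range q).map (fun j => [b.getD j [], a.getD j []])).getD (q - 1 - k) []).getD j [])
      = (List.range q).map (fun k => ([b.getD (q - 1 - k) [], a.getD (q - 1 - k) []]).getD j []) := by
    intro j
    apply List.map_congr_left
    intro k hk
    rw [PySem.List.getD_map_range _ _ _ _ (by have := List.mem_range.mp hk; omega)]
  have hr2 : List.range (0 + 1 + 1) = [0, 1] := rfl
  rw [hr2]
  simp only [List.map_cons, List.map_nil]
  rw [hgen 0, hgen 1]
  simp only [List.getD_cons_zero, List.getD_cons_succ]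
  rw [map_range_getD_rev b q [] hb, map_range_getD_rev a q [] ha]

-- ===== VERDICT (by name: the statement is the Claim_ definition above) =====
theorem rotate_twice_spec : Claim_equal_rotate_twice := by
  intro bowl _ hpre
  unfold Pre_rotate_twice at hpre
  unfold Spec_rotate_twice
  set h := bowl.length / 2 with hh
  set q := h / 2 with hq
  have hhle : h ≤ bowl.length := by omega
  have hh2 : 2 ≤ h := by omega
  have hq1 : 1 ≤ q := by omega
  have hqh : q ≤ h := by omega
  set a : List (List Int) := ((bowl.take h).reverse).take q with hadef
  set b : List (List Int) := (bowl.drop h).take q with hbdef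
  have htl : (bowl.take h).length = h := by rw [List.length_take]; omega
  have ha : a.length = q := by
    rw [hadef, List.length_take, List.length_reverse, htl]; omega
  have hb : b.length = q := by
    rw [hbdef, List.length_take, List.length_drop]; omega
  have hA : rotate_twice bowl
      = rotateArrayA (rotateArrayA [a, b])
        ++ [((bowl.take h).reverse).drop q, (bowl.drop h).drop q] := by
    simp only [rotate_twice]
    have hr2 : List.range 2 = [0, 1] := rfl
    rw [hr2]
    simp only [List.foldl_cons, List.foldl_nil, List.nil_append, List.getD]
    simp only [List.getElem?_cons_zero, List.getElem?_cons_succ, Option.getD_some,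
               ← hh, List.length_reverse, htl, ← hq, List.cons_append, List.nil_append]
    rfl
  have hB : rotate_twice_alt bowl
      = [b.reverse, a.reverse]
        ++ [((bowl.take h).reverse).drop q, (bowl.drop h).drop q] := by
    simp only [rotate_twice_alt, ← hh, ← hq, List.map_cons, List.map_nil,
               List.reverse_cons, List.reverse_nil, List.nil_append, List.cons_append]
    rw [if_neg (by omega : ¬ q = 0)]
  rw [hA, hB, rot2 a b q hq1 ha hb]
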